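-- pv_equiv track=rewrite | github.com/AshwinHarishP/Coding-Ninjas | Python /Dynamic Programming/Longest String Chain.py | check
-- ===== SOURCE A (Python) =====
-- def check(s1, s2):
--     if len(s1) != len(s2) + 1:
--         return False
--
--     first, second = 0, 0
--     inserted = False
--
--     while second < len(s2):
--         if s1[first] == s2[second]:
--             first += 1
--             second += 1
--         elif not inserted:
--             inserted = True
--             first += 1
--         else:
--             return False
--
--     return True
-- ===== SOURCE B (Python) =====
-- def check(s1, s2):
--     if len(s1) != len(s2) + 1:
--         return False
--     return any(s1[:i] + s1[i+1:] == s2 for i in range(len(s1)))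
-- ===== Notes on version B (the rewrite author's own statement) =====
-- stated objective: alternative
-- what changed: Replaces the two-pointer walk with an inserted flag by a generate-and-test: try deleting each position of s1 and compare the result with s2; simpler and obviously correct, but quadratic where A is linear.
import Mathlib
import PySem

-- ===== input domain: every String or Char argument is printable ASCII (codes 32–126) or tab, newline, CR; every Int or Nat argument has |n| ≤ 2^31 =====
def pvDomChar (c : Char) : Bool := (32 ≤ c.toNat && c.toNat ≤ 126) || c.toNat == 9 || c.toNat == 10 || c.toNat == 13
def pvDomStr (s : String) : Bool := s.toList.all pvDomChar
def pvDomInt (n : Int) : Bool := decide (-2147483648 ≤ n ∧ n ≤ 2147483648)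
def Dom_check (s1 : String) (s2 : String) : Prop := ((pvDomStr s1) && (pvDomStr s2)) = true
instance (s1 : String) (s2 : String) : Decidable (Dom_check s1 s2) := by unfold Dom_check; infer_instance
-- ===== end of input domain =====

-- B replaces A's two-pointer walk with an inserted flag by a generate-and-test:
-- try deleting each position of s1 and compare with s2 (alternative; simpler but quadratic).

-- ===== PORT A =====
-- A's while loop over (first, second, inserted): the two index pointers are the
-- untraversed tails of s1 and s2; the [] / _::_ case (s1 exhausted) is unreachable
-- after the length guard.
def checkLoop : List Char → List Char → Bool → Bool
  | _, [], _ => true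
  | [], _ :: _, _ => false
  | c1 :: t1, c2 :: t2, inserted =>
      if c1 = c2 then checkLoop t1 t2 inserted
      else if !inserted then checkLoop t1 (c2 :: t2) true
      else false

def check (s1 : String) (s2 : String) : Bool :=
  if s1.toList.length ≠ s2.toList.length + 1 then false
  else checkLoop s1.toList s2.toList false

-- ===== PORT B =====
-- B's `any(... for i in range(len(s1)))`: range(len(s1)) is 0..n-1, and for
-- nonnegative i the slices s1[:i] and s1[i+1:] are exactly take i and drop (i+1).
def check_alt (s1 : String) (s2 : String) : Bool :=
  if s1.toList.length ≠ s2.toList.length + 1 then false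
  else (List.range s1.toList.length).any fun i =>
    s1.toList.take i ++ s1.toList.drop (i + 1) == s2.toList

-- ===== PRECONDITION & SPEC =====
def Spec_check (s1 : String) (s2 : String) (out : Bool) : Prop := out = check_alt s1 s2
instance (s1 : String) (s2 : String) (out : Bool) : Decidable (Spec_check s1 s2 out) := by unfold Spec_check; infer_instance

-- ===== CLAIM (what is proved, stated in full; the proofs are below) =====
def Claim_equal_check : Prop := ∀ (s1 : String) (s2 : String), Dom_check s1 s2 → Spec_check s1 s2 (check s1 s2)

-- ===== LEMMAS AND PROOFS =====

-- After the insertion, A walks the two equal-length tails pairwise: that is equality.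
theorem checkLoop_true_eq (l2 l1 : List Char) (h : l1.length = l2.length) :
    checkLoop l1 l2 true = decide (l1 = l2) := by
  induction l2 generalizing l1 with
  | nil =>
    cases l1 with
    | nil => simp [checkLoop]
    | cons c t => simp at h
  | cons c2 t2 ih =>
    cases l1 with
    | nil => simp at h
    | cons c1 t1 =>
      simp only [checkLoop]
      by_cases hc : c1 = c2
      · subst hc
        rw [if_pos rfl, ih t1 (by simpa using h)]
        simp
      · simp [hc]

-- A's loop equals B's brute-force "some single deletion of l1 yields l2".
theorem loop_eq_any (l2 l1 : List Char) (h : l1.length = l2.length + 1) :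
    checkLoop l1 l2 false =
      (List.range l1.length).any (fun i => l1.take i ++ l1.drop (i + 1) == l2) := by
  induction l2 generalizing l1 with
  | nil =>
    match l1, h with
    | [c], _ => simp [checkLoop, List.range_succ]
  | cons c2 t2 ih =>
    cases l1 with
    | nil => simp at h
    | cons c1 t1 =>
      have hlen : t1.length = t2.length + 1 := by simpa using h
      -- deleting position i+1 of c1::t1 yields c2::t2 iff c1=c2 and deleting i of t1 yields t2
      have hsucc : ∀ i : ℕ,
          ((c1 :: t1).take (i + 1) ++ (c1 :: t1).drop (i + 1 + 1) == c2 :: t2)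
          = (decide (c1 = c2) && (t1.take i ++ t1.drop (i + 1) == t2)) := by
        intro i
        simp [List.take_succ_cons, List.drop_succ_cons, Bool.beq_eq_decide_eq]
      rw [show (c1 :: t1).length = t1.length + 1 from rfl, List.range_succ_eq_map,
        List.any_cons, List.any_map]
      simp only [Function.comp_def, Nat.succ_eq_add_one, hsucc]
      have hhead : ((c1 :: t1).take 0 ++ (c1 :: t1).drop (0 + 1) == c2 :: t2)
          = decide (t1 = c2 :: t2) := by
        simp [Bool.beq_eq_decide_eq]
      rw [hhead]
      by_cases hc : c1 = c2
      · subst hc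
        simp only [checkLoop, if_true]
        rw [ih t1 hlen]
        simp only [decide_true, Bool.true_and]
        by_cases h0 : t1 = c1 :: t2
        · -- the extra head disjunct (delete c1 itself) is absorbed: delete index 0 of t1
          have hany : (List.range t1.length).any
              (fun i => t1.take i ++ t1.drop (i + 1) == t2) = true := by
            rw [List.any_eq_true]
            exact ⟨0, by simp [h0], by simp [h0]⟩
          rw [hany]
          simp
        · simp [h0]
      · simp only [checkLoop, if_neg hc]
        rw [checkLoop_true_eq (c2 :: t2) t1 (by simpa using hlen)]
        simp [hc]

-- ===== VERDICT (by name: the statement is the Claim_ definition above) =====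
theorem check_spec : Claim_equal_check := by
  intro s1 s2 _
  unfold Spec_check check check_alt
  by_cases h : s1.toList.length = s2.toList.length + 1
  · rw [if_neg (by simp [h]), if_neg (by simp [h])]
    exact loop_eq_any _ _ h
  · rw [if_pos h, if_pos h]
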